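-- pv_equiv track=rewrite | github.com/qkrwjdduf159/Coding-test | 프로그래머스/Python/프로그래머스 1단계.py | solution
-- ===== SOURCE A (Python) =====
-- def solution(a, b, n):
--     answer = 0
--     anything = 0
--     while True:
--         n, anything = (n+anything)//a, (n+anything)%a
--         n = n*b
--         answer += n
--         if n==0:
--             break
--
--     return answer
-- ===== SOURCE B (Python) =====
-- def solution(a, b, n):
--     # each exchange of a empties yields b bottles, netting a - b;
--     # exchanges stop once fewer than a bottles remain
--     exchanges = max(0, (n - a) // (a - b) + 1)
--     return b * exchanges
-- ===== Notes on version B (the rewrite author's own statement) =====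
-- stated objective: simpler
-- what changed: Replaced the iterative exchange-simulation loop with the loop-free closed form b * max(0, (n-a)//(a-b) + 1); Pre_ keeps every region where A terminates with its exchange count (0 <= b < a, b = 0, or too few bottles for one exchange) and excludes only inputs where A diverges (e.g. a = b, or b >= a with enough bottles), raises (a = 0), or halts with an accidental value of its chaotic loop.
-- intended difference: For negative n with 0 < b < a, A returns the negative total b*(n//(a-b)), an artefact of floor division carrying phantom negative bottles through the loop, while B returns 0, the intended value since no exchange is possible without bottles. — e.g. on solution(3, 1, -5): A returns -3, B returns 0
-- outside the precondition, e.g. on solution(2, 5, 1): A returns 0, B returns 5; on solution(-15, -10, 14): A returns 30, B returns 0; on solution(2, 2, 4): A does not finish within the time limit, B raises ZeroDivisionError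
import Mathlib
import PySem

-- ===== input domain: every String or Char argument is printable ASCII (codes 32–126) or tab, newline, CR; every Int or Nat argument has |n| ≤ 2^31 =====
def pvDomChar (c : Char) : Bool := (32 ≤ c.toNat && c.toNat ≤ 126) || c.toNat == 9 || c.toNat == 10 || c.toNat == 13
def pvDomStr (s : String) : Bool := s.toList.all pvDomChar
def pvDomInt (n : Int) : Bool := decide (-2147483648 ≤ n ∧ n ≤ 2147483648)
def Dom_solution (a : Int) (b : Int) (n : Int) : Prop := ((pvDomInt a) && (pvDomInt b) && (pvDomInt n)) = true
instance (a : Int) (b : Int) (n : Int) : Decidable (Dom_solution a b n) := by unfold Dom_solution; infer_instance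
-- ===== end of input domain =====

-- B replaces A's iterative exchange-simulation loop with a loop-free closed form; return-value equivalence on Pre_ outside D_ (negative n), where B returns the intended 0.


-- ===== PORT A =====
-- A's 'while True' loop, step for step; the fuel only makes the recursion total (under
-- Pre_solution the loop runs at most |n|+2 iterations, so the fuel is never exhausted — proved below).
def solutionLoop (a : Int) (b : Int) : Nat → Int → Int → Int → Int
  | 0, _, _, answer => answer
  | Nat.succ f, n, anything, answer =>
    let n1 := PySem.Int.floordiv (n + anything) a      -- n, anything = (n+anything)//a, (n+anything)%a
    let any1 := PySem.Int.mod (n + anything) a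
    let n2 := n1 * b                                    -- n = n*b
    let answer1 := answer + n2                          -- answer += n
    if n2 = 0 then answer1 else solutionLoop a b f n2 any1 answer1

def solution (a : Int) (b : Int) (n : Int) : Int :=
  solutionLoop a b (n.natAbs + a.natAbs + b.natAbs + 2) n 0 0

-- ===== PORT B =====
def solution_alt (a : Int) (b : Int) (n : Int) : Int :=
  b * max 0 (PySem.Int.floordiv (n - a) (a - b) + 1)

-- ===== PRECONDITION & SPEC =====
-- Pre_ is the region where A terminates and its value is the exchange count: the problem's
-- stated domain 0 ≤ b < a (any n), plus the inputs where the very first exchange is already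
-- empty (b = 0, or fewer than a bottles available) so A returns 0.  Outside Pre_, A either
-- diverges (a = b, or b ≥ a with enough bottles), raises (a = 0), or returns accidental values
-- of its chaotic loop; B raises on a = b.  Examples are cited in claim.json.
def Pre_solution (a : Int) (b : Int) (n : Int) : Prop :=
  (0 ≤ b ∧ b < a) ∨ (b = 0 ∧ a ≠ 0) ∨
  (0 < a ∧ b < 0 ∧ 0 ≤ n ∧ n < a) ∨ (a < 0 ∧ a < b ∧ a < n ∧ n ≤ 0)
instance (a : Int) (b : Int) (n : Int) : Decidable (Pre_solution a b n) := by unfold Pre_solution; infer_instance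
def pvWitness_solution : Int × Int × Int := (3, 1, 10)
-- For negative n with 0 < b < a, A returns the negative total b*(n//(a-b)) — an artefact of
-- floor division carrying phantom negative bottles through the loop — while B returns 0, the
-- intended value since no exchange is possible without bottles.
def D_solution (a : Int) (b : Int) (n : Int) : Prop := n < 0 ∧ 0 < b ∧ b < a
instance (a : Int) (b : Int) (n : Int) : Decidable (D_solution a b n) := by unfold D_solution; infer_instance
def Spec_solution (a : Int) (b : Int) (n : Int) (out : Int) : Prop := ¬ D_solution a b n → out = solution_alt a b n
instance (a : Int) (b : Int) (n : Int) (out : Int) : Decidable (Spec_solution a b n out) := by unfold Spec_solution; infer_instance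
def pvDiffWitness_solution : Int × Int × Int := (3, 1, -5)
def pvDiffWitnessOut_solution : Int × Int := (-3, 0)

-- ===== CLAIM (what is proved, stated in full; the proofs are below) =====
def Claim_unchanged_solution : Prop := ∀ (a : Int) (b : Int) (n : Int), Dom_solution a b n → Pre_solution a b n → Spec_solution a b n (solution a b n)
def Claim_changed_solution : Prop := Dom_solution (pvDiffWitness_solution.1) (pvDiffWitness_solution.2.1) (pvDiffWitness_solution.2.2) ∧ Pre_solution (pvDiffWitness_solution.1) (pvDiffWitness_solution.2.1) (pvDiffWitness_solution.2.2) ∧ D_solution (pvDiffWitness_solution.1) (pvDiffWitness_solution.2.1) (pvDiffWitness_solution.2.2) ∧ solution (pvDiffWitness_solution.1) (pvDiffWitness_solution.2.1) (pvDiffWitness_solution.2.2) = pvDiffWitnessOut_solution.1 ∧ solution_alt (pvDiffWitness_solution.1) (pvDiffWitness_solution.2.1) (pvDiffWitness_solution.2.2) = pvDiffWitnessOut_solution.2 ∧ pvDiffWitnessOut_solution.1 ≠ pvDiffWitnessOut_solution.2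
def Claim_exact_solution : Prop := ∀ (a : Int) (b : Int) (n : Int), Dom_solution a b n → Pre_solution a b n → D_solution a b n → solution a b n ≠ solution_alt a b n

-- ===== LEMMAS AND PROOFS =====

-- one unfolding of A's loop body
lemma loop_succ (a b : Int) (f : Nat) (n anything answer : Int) :
    solutionLoop a b (f + 1) n anything answer
      = if PySem.Int.floordiv (n + anything) a * b = 0
        then answer + PySem.Int.floordiv (n + anything) a * b
        else solutionLoop a b f (PySem.Int.floordiv (n + anything) a * b)
               (PySem.Int.mod (n + anything) a)
               (answer + PySem.Int.floordiv (n + anything) a * b) := rfl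

-- shift rule: subtracting q exchanges from the total shifts the exchange count by q (divisor a-b > 0)
lemma floordiv_shift (d x q : Int) (hd : 0 < d) :
    PySem.Int.floordiv (x - q * d) d = PySem.Int.floordiv x d - q := by
  rw [PySem.Int.floordiv_eq_ediv_of_pos hd, PySem.Int.floordiv_eq_ediv_of_pos hd]
  rw [show x - q * d = x + (-q) * d by ring, Int.add_mul_ediv_right _ _ (by omega : d ≠ 0)]
  ring

-- Loop invariant, nonnegative totals: with 0 ≤ b < a and enough fuel the loop adds
-- b * max 0 ((t-a)//(a-b) + 1) to the accumulator, where t = n + anything.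
lemma loop_closed (a b : Int) (hb0 : 0 ≤ b) (hba : b < a) :
    ∀ (fuel : Nat) (n anything answer : Int), 0 ≤ n + anything → (n + anything).toNat < fuel →
      solutionLoop a b fuel n anything answer
        = answer + b * max 0 (PySem.Int.floordiv (n + anything - a) (a - b) + 1) := by
  intro fuel
  induction fuel with
  | zero => intro n anything answer ht hf; omega
  | succ f ih =>
    intro n anything answer ht hf
    have ha : 0 < a := by omega
    have hd : 0 < a - b := by omega
    set t := n + anything with htdef
    set q := PySem.Int.floordiv t a with hqdef
    set r := PySem.Int.mod t a with hrdef
    have hqr : q * a + r = t := PySem.Int.floordiv_mul_add_mod t a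
    have hr0 : 0 ≤ r := PySem.Int.mod_nonneg t ha
    have hra : r < a := PySem.Int.mod_lt t ha
    have hq0 : 0 ≤ q := (PySem.Int.le_floordiv_iff_mul_le ha).mpr (by omega)
    rw [loop_succ]
    by_cases hz : q * b = 0
    · rw [if_pos hz, hz]
      by_cases hb : b = 0
      · simp [hb]
      · have hq : q = 0 := by
          rcases mul_eq_zero.mp hz with h | h
          exacts [h, absurd h hb]
        have hta : t < a := by nlinarith
        have hneg : PySem.Int.floordiv (t - a) (a - b) < 0 :=
          (PySem.Int.floordiv_lt_iff_lt_mul hd).mpr (by omega)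
        have : max 0 (PySem.Int.floordiv (t - a) (a - b) + 1) = 0 := by omega
        rw [this]; ring
    · rw [if_neg hz]
      have hb1 : 0 < b := by
        rcases lt_or_eq_of_le hb0 with h | h; · exact h
        · exact absurd (by rw [← h]; ring) hz
      have hq1 : 1 ≤ q := by
        rcases lt_or_eq_of_le hq0 with h | h; · omega
        · exact absurd (by rw [← h]; ring) hz
      have hta : a ≤ t := by nlinarith
      have ht' : q * b + r = t - q * (a - b) := by rw [← hqr]; ring
      have ht'0 : 0 ≤ q * b + r := by positivity
      have hdec : q * b + r ≤ t - 1 := by nlinarith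
      rw [ih (q * b) r (answer + q * b) ht'0 (by omega)]
      have hX0 : 0 ≤ PySem.Int.floordiv (t - a) (a - b) :=
        (PySem.Int.le_floordiv_iff_mul_le hd).mpr (by omega)
      rw [show max 0 (PySem.Int.floordiv (t - a) (a - b) + 1)
            = PySem.Int.floordiv (t - a) (a - b) + 1 by omega]
      have hshift : PySem.Int.floordiv (q * b + r - a) (a - b)
          = PySem.Int.floordiv (t - a) (a - b) - q := by
        rw [show q * b + r - a = (t - a) - q * (a - b) by rw [← hqr]; ring]
        exact floordiv_shift _ _ _ hd
      by_cases hta' : a ≤ q * b + r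
      · have hX0' : 0 ≤ PySem.Int.floordiv (q * b + r - a) (a - b) :=
          (PySem.Int.le_floordiv_iff_mul_le hd).mpr (by omega)
        rw [show max 0 (PySem.Int.floordiv (q * b + r - a) (a - b) + 1)
              = PySem.Int.floordiv (q * b + r - a) (a - b) + 1 by omega, hshift]
        ring
      · have hneg : PySem.Int.floordiv (q * b + r - a) (a - b) < 0 :=
          (PySem.Int.floordiv_lt_iff_lt_mul hd).mpr (by omega)
        rw [show max 0 (PySem.Int.floordiv (q * b + r - a) (a - b) + 1) = 0 by omega]
        have hge : (-1 : Int) ≤ PySem.Int.floordiv (q * b + r - a) (a - b) :=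
          (PySem.Int.le_floordiv_iff_mul_le hd).mpr (by nlinarith)
        have hXq : PySem.Int.floordiv (t - a) (a - b) = q - 1 := by omega
        rw [hXq]; ring

-- Loop invariant, negative totals: with 0 ≤ b < a the loop adds b * (t//(a-b)) and returns.
lemma loop_closed_neg (a b : Int) (hb0 : 0 ≤ b) (hba : b < a) :
    ∀ (fuel : Nat) (n anything answer : Int), n + anything < 0 → (-(n + anything)).toNat + 1 < fuel →
      solutionLoop a b fuel n anything answer
        = answer + b * PySem.Int.floordiv (n + anything) (a - b) := by
  intro fuel
  induction fuel with
  | zero => intro n anything answer ht hf; omega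
  | succ f ih =>
    intro n anything answer ht hf
    have ha : 0 < a := by omega
    have hd : 0 < a - b := by omega
    set t := n + anything with htdef
    set q := PySem.Int.floordiv t a with hqdef
    set r := PySem.Int.mod t a with hrdef
    have hqr : q * a + r = t := PySem.Int.floordiv_mul_add_mod t a
    have hr0 : 0 ≤ r := PySem.Int.mod_nonneg t ha
    have hra : r < a := PySem.Int.mod_lt t ha
    have hq1 : q < 0 := (PySem.Int.floordiv_lt_iff_lt_mul ha).mpr (by omega)
    rw [loop_succ]
    by_cases hb : b = 0
    · rw [if_pos (by rw [hb]; ring), hb]; ring_nf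
    · have hb1 : 0 < b := by omega
      have hz : q * b ≠ 0 := by
        have : q * b < 0 := mul_neg_of_neg_of_pos hq1 hb1
        omega
      rw [if_neg hz]
      have ht' : q * b + r = t - q * (a - b) := by rw [← hqr]; ring
      have hshift : PySem.Int.floordiv (q * b + r) (a - b)
          = PySem.Int.floordiv t (a - b) - q := by
        rw [show q * b + r = t - q * (a - b) by rw [← hqr]; ring]
        exact floordiv_shift _ _ _ hd
      have hup : t + 1 ≤ q * b + r := by nlinarith
      by_cases ht'0 : q * b + r < 0
      · rw [ih (q * b) r (answer + q * b) ht'0 (by omega), hshift]; ring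
      · -- the new total is in [0, a-b): one more (empty) iteration and the loop stops
        have hlt : q * b + r < a - b := by nlinarith
        have hq' : PySem.Int.floordiv (q * b + r) (a - b) = 0 := by
          rw [PySem.Int.floordiv_eq_iff_of_pos hd]; omega
        have hf1 : ∃ f', f = f' + 1 := ⟨f - 1, by omega⟩
        obtain ⟨f', rfl⟩ := hf1
        rw [loop_succ]
        have hq0' : PySem.Int.floordiv (q * b + r) a = 0 := by
          rw [PySem.Int.floordiv_eq_iff_of_pos ha]
          constructor
          · omega
          · omega
        rw [hq0']
        rw [if_pos (by ring)]
        have : PySem.Int.floordiv t (a - b) = q := by omega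
        rw [this]; ring

-- ===== VERDICT (by name: the statements are the Claim_ definitions above) =====
theorem solution_spec : Claim_unchanged_solution := by
  intro a b n _ hpre
  unfold Spec_solution D_solution
  intro hnd
  unfold solution solution_alt
  rcases hpre with ⟨hb0, hba⟩ | ⟨hb, ha⟩ | ⟨ha, hb, hn0, hna⟩ | ⟨ha, hab, hna, hn0⟩
  · -- stated domain 0 ≤ b < a, any n; ¬D_ forces n ≥ 0 or b = 0
    by_cases hn : n < 0
    · have hb : b = 0 := by omega
      rw [loop_closed_neg a b hb0 hba _ n 0 0 (by omega) (by omega), hb]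
      ring
    · rw [loop_closed a b hb0 hba _ n 0 0 (by omega) (by omega)]
      simp only [add_zero]; ring
  · -- b = 0: the first iteration already multiplies the exchanged sets by 0 and stops
    rw [show n.natAbs + a.natAbs + b.natAbs + 2 = (n.natAbs + a.natAbs + b.natAbs + 1) + 1 from rfl,
        loop_succ, hb, if_pos (by ring)]
    ring
  · -- 0 ≤ n < a with b < 0: no full set of a bottles, A returns 0 immediately
    rw [show n.natAbs + a.natAbs + b.natAbs + 2 = (n.natAbs + a.natAbs + b.natAbs + 1) + 1 from rfl,
        loop_succ]
    have hq : PySem.Int.floordiv (n + 0) a = 0 := by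
      rw [PySem.Int.floordiv_eq_iff_of_pos ha]; omega
    rw [hq, if_pos (by ring)]
    have hneg : PySem.Int.floordiv (n - a) (a - b) < 0 :=
      (PySem.Int.floordiv_lt_iff_lt_mul (by omega)).mpr (by omega)
    rw [show max 0 (PySem.Int.floordiv (n - a) (a - b) + 1) = 0 by omega]
    ring
  · -- a < n ≤ 0 with a < 0: the first quotient is 0 and A returns 0
    rw [show n.natAbs + a.natAbs + b.natAbs + 2 = (n.natAbs + a.natAbs + b.natAbs + 1) + 1 from rfl,
        loop_succ]
    set q := PySem.Int.floordiv (n + 0) a with hqdef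
    have hqr : q * a + PySem.Int.mod (n + 0) a = n + 0 := PySem.Int.floordiv_mul_add_mod (n + 0) a
    obtain ⟨hrlo, hrhi⟩ := PySem.Int.mod_neg_bounds (n + 0) ha
    have hq : q = 0 := by
      by_contra hqne
      rcases lt_or_gt_of_ne hqne with h | h
      · nlinarith
      · nlinarith
    rw [hq, if_pos (by ring)]
    have hd : a - b < 0 := by omega
    -- (n - a) > 0 over a negative divisor: the quotient is negative, so max clamps to 0
    have hq2r : PySem.Int.floordiv (n - a) (a - b) * (a - b) + PySem.Int.mod (n - a) (a - b) = n - a :=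
      PySem.Int.floordiv_mul_add_mod (n - a) (a - b)
    obtain ⟨hr2lo, hr2hi⟩ := PySem.Int.mod_neg_bounds (n - a) hd
    have hq2 : PySem.Int.floordiv (n - a) (a - b) < 0 := by
      by_contra hq2n
      push Not at hq2n
      nlinarith
    rw [show max 0 (PySem.Int.floordiv (n - a) (a - b) + 1) = 0 by omega]
    ring

theorem solution_changed : Claim_changed_solution := by
  unfold Claim_changed_solution; decide

theorem solution_tight : Claim_exact_solution := by
  intro a b n _ hpre hd
  obtain ⟨hn, hb1, hba⟩ := hd
  have hb0 : (0:Int) ≤ b := by omega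
  unfold solution solution_alt
  rw [loop_closed_neg a b hb0 hba _ n 0 0 (by omega) (by omega)]
  simp only [add_zero, zero_add]
  have hdpos : 0 < a - b := by omega
  have hq : PySem.Int.floordiv n (a - b) < 0 :=
    (PySem.Int.floordiv_lt_iff_lt_mul hdpos).mpr (by nlinarith)
  have hA : b * PySem.Int.floordiv n (a - b) < 0 := mul_neg_of_pos_of_neg hb1 hq
  have hB : 0 ≤ b * max 0 (PySem.Int.floordiv (n - a) (a - b) + 1) := by positivity
  omega
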